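-- pv_equiv track=rewrite | github.com/ironsj/MTH225-Assignments | CodingAssignment4.py | inclusionExclusion3
-- ===== SOURCE A (Python) =====
-- def inclusionExclusion3(S, T, U): #creates inclusion-exclusion function with lists S, T, and U as inputs
--     cardinality = 0 #sets the cardinality of the union of sets to 0
--     allSets = intersect(U, intersect(S, T)) #creates a list that is the intersection of the inputs
--     for s in S: #loops through each element in S
--         cardinality += 1 #adds 1 to the cardinality for each element in S
--     for t in T: # loops through each element in T
--         cardinality += 1 #adds 1 to the cardinality for each element in T
--     for u in U: #loops through each element in U
--         cardinality += 1 #adds 1 for each element in U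
--     for element in intersect(S, T): #loops through each element in the intersection of S and T
--         cardinality -=1 #subtracts 1 from the cardinality for each element in S and T
--     for element in intersect(S, U): #loops through each element in the intersection of S and U
--         cardinality -=1 #subtracts 1 from the cardinality for each element in S and U
--     for element in intersect(U, T):#loops through each element in the intersection of U and T
--         cardinality -= 1 #subtracts 1 from the cardinality for each element in U and T
--     for element in allSets: #loops through each element in the intersection of each set
--         cardinality += 1 #adds 1 to the cardinality for each element in the intersection of each set
--     return cardinality #returns the cardinality
--
-- def intersect(A, B): #creates intersect funtion with lists A & B as arguments
--     temp_list = [] #creates temporary list to be used in the function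
--     intersect_list = [] #creates list that will be intersection of A & B
--     for element in A: #goes through elements of A
--         if element in B: #creates a condition that makes it so element must also be in B
--             temp_list.append(element) #adds elements to temporary list
--     for element in temp_list: #goes through elements in the temporary list
--         if element not in intersect_list: #creates a condition for anything not in list already
--             intersect_list.append(element) #adds elements to final list
--             intersect_list.sort() #sorts list in ascending order
--     return intersect_list #returns the final list
-- ===== SOURCE B (Python) =====
-- def inclusionExclusion3(S, T, U):
--     cs = {}
--     for x in S:
--         cs[x] = cs.get(x, 0) + 1
--     ct = {}
--     for x in T:
--         ct[x] = ct.get(x, 0) + 1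
--     cu = {}
--     for x in U:
--         cu[x] = cu.get(x, 0) + 1
--     total = 0
--     for x in set(S) | set(T) | set(U):
--         total += cs.get(x, 0) + ct.get(x, 0) + cu.get(x, 0)
--         total -= (x in cs and x in ct) + (x in cs and x in cu) + (x in cu and x in ct)
--         total += (x in cs and x in ct and x in cu)
--     return total
-- ===== Notes on version B (the rewrite author's own statement) =====
-- stated objective: faster
-- what changed: Replaced A's seven whole-list passes and repeated quadratic intersect (with a sort inside the dedup loop) by three dict frequency tables plus one pass over the distinct elements of S|T|U, applying inclusion-exclusion per element.
import Mathlib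
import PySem

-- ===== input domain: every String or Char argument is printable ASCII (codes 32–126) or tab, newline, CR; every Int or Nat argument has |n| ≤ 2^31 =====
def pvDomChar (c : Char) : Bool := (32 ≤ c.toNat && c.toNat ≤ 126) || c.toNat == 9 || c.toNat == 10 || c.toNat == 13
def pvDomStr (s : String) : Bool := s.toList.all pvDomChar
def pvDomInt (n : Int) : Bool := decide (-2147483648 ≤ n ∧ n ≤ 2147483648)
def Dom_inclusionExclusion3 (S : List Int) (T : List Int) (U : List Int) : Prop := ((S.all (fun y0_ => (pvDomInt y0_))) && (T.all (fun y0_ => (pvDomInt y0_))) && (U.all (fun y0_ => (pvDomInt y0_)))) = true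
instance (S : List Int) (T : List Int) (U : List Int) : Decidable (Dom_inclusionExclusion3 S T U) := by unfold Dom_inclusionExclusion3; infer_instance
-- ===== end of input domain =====

-- B replaces A's seven whole-list passes and quadratic `intersect` by dict frequency
-- tables and a single inclusion-exclusion pass over the distinct elements (objective: faster).

-- ===== PORT A =====
-- literal port of `intersect`: filter loop into temp_list, then dedup loop that re-sorts after every append
def pyIntersect (A : List Int) (B : List Int) : List Int :=
  let temp_list := A.foldl (fun acc e => if e ∈ B then acc ++ [e] else acc) []
  temp_list.foldl (fun acc e => if e ∈ acc then acc else PySem.List.sorted (acc ++ [e]) (fun x => x) false) []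

def inclusionExclusion3 (S : List Int) (T : List Int) (U : List Int) : Int :=
  let cardinality : Int := 0
  let allSets := pyIntersect U (pyIntersect S T)
  let cardinality := S.foldl (fun c _ => c + 1) cardinality
  let cardinality := T.foldl (fun c _ => c + 1) cardinality
  let cardinality := U.foldl (fun c _ => c + 1) cardinality
  let cardinality := (pyIntersect S T).foldl (fun c _ => c - 1) cardinality
  let cardinality := (pyIntersect S U).foldl (fun c _ => c - 1) cardinality
  let cardinality := (pyIntersect U T).foldl (fun c _ => c - 1) cardinality
  let cardinality := allSets.foldl (fun c _ => c + 1) cardinality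
  cardinality

-- ===== PORT B =====
-- cs[x] = cs.get(x, 0) + 1  counting loop
def pvCounterOf (xs : List Int) : PySem.Dict Int Int :=
  xs.foldl (fun d x => d.insert x (d.getD x 0 + 1)) PySem.Dict.empty

-- Python bool used in arithmetic
def pvB2I (b : Bool) : Int := if b then 1 else 0

def inclusionExclusion3_alt (S : List Int) (T : List Int) (U : List Int) : Int :=
  let cs := pvCounterOf S
  let ct := pvCounterOf T
  let cu := pvCounterOf U
  -- set(S) | set(T) | set(U); the fold below is a sum, independent of iteration order
  let E := PySem.Set.union (PySem.Set.union (PySem.Set.ofList S) T) U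
  E.foldl (fun total x =>
    total + (cs.getD x 0 + ct.getD x 0 + cu.getD x 0)
      - (pvB2I (cs.contains x && ct.contains x) + pvB2I (cs.contains x && cu.contains x)
          + pvB2I (cu.contains x && ct.contains x))
      + pvB2I (cs.contains x && ct.contains x && cu.contains x)) 0

-- ===== PRECONDITION & SPEC =====
def Spec_inclusionExclusion3 (S : List Int) (T : List Int) (U : List Int) (out : Int) : Prop := out = inclusionExclusion3_alt S T U
instance (S : List Int) (T : List Int) (U : List Int) (out : Int) : Decidable (Spec_inclusionExclusion3 S T U out) := by unfold Spec_inclusionExclusion3; infer_instance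

-- ===== CLAIM (what is proved, stated in full; the proofs are below) =====
def Claim_equal_inclusionExclusion3 : Prop := ∀ (S : List Int) (T : List Int) (U : List Int), Dom_inclusionExclusion3 S T U → Spec_inclusionExclusion3 S T U (inclusionExclusion3 S T U)

-- ===== LEMMAS AND PROOFS =====

-- the dedup-and-resort loop is, up to permutation, the plain Set.add loop
theorem pvSortLoop_perm (l : List Int) (a b : List Int) (hab : a.Perm b) :
    (l.foldl (fun acc e => if e ∈ acc then acc else PySem.List.sorted (acc ++ [e]) (fun x => x) false) a).Perm
      (l.foldl PySem.Set.add b) := by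
  induction l generalizing a b with
  | nil => simpa using hab
  | cons e l ih =>
    simp only [List.foldl_cons]
    by_cases he : e ∈ a
    · rw [if_pos he]
      have : PySem.Set.add b e = b := by
        simp [PySem.Set.add, PySem.Set.contains, (hab.mem_iff).mp he]
      rw [this]; exact ih a b hab
    · rw [if_neg he]
      have hnb : e ∉ b := fun h => he ((hab.mem_iff).mpr h)
      have : PySem.Set.add b e = b ++ [e] := by
        simp [PySem.Set.add, PySem.Set.contains, hnb]
      rw [this]
      exact ih _ _ ((PySem.List.sorted_perm _ _ _).trans (hab.append_right [e]))

theorem pvIntersect_perm (A B : List Int) :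
    (pyIntersect A B).Perm (PySem.Set.ofList (A.filter (fun e => decide (e ∈ B)))) := by
  unfold pyIntersect
  rw [PySem.List.foldl_append_ite_eq_filter]
  simpa [PySem.Set.ofList_eq_foldl] using
    pvSortLoop_perm (A.filter (fun e => decide (e ∈ B))) [] [] (List.Perm.refl [])

theorem pvMem_intersect (A B : List Int) (x : Int) : x ∈ pyIntersect A B ↔ x ∈ A ∧ x ∈ B := by
  rw [(pvIntersect_perm A B).mem_iff]
  simp [PySem.Set.mem_ofList]

theorem pvNodup_intersect (A B : List Int) : (pyIntersect A B).Nodup :=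
  (pvIntersect_perm A B).nodup_iff.mpr (PySem.Set.nodup_ofList _)

-- two nodup lists with the same members have the same length
theorem pvLen_eq_of_nodup (l₁ l₂ : List Int) (h₁ : l₁.Nodup) (h₂ : l₂.Nodup)
    (h : ∀ x, x ∈ l₁ ↔ x ∈ l₂) : l₁.length = l₂.length :=
  ((List.perm_ext_iff_of_nodup h₁ h₂).mpr h).length_eq

-- counting loop over S: cost-free length via foldl_add
theorem pvFoldl_len (L : List Int) (a : Int) : L.foldl (fun c _ => c + 1) a = a + L.length := by
  induction L generalizing a with
  | nil => simp
  | cons x t ih => simp [ih]; ring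

theorem pvFoldl_sub (L : List Int) (a : Int) : L.foldl (fun c _ => c - 1) a = a - L.length := by
  induction L generalizing a with
  | nil => simp
  | cons x t ih => simp [ih]; ring

-- sum of an indicator over a list = countP
theorem pvSum_ite (E : List Int) (p : Int → Prop) [DecidablePred p] :
    (E.map (fun x => if p x then (1 : Int) else 0)).sum = ((E.filter (fun x => decide (p x))).length : Int) := by
  induction E with
  | nil => simp
  | cons e t ih =>
    by_cases he : p e <;> simp [List.filter_cons, he, ih] <;> ring

theorem pvSum_ind (E : List Int) (s : Int) :
    (E.map (fun x => if x = s then (1:Int) else 0)).sum = (E.count s : Int) := by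
  induction E with
  | nil => simp
  | cons y ys ihy =>
    rcases eq_or_ne y s with rfl | hys
    · simp [List.count_cons, ihy]; ring
    · simp [List.count_cons, hys, ihy]

-- sum of multiplicities of S over a nodup list containing S's elements = |S|
theorem pvSum_count (S E : List Int) (hN : E.Nodup) (hsub : ∀ x ∈ S, x ∈ E) :
    (E.map (fun x => (S.count x : Int))).sum = S.length := by
  induction S with
  | nil => simp
  | cons s t ih =>
    have hs : s ∈ E := hsub s (by simp)
    have hmap : (E.map (fun x => ((s :: t).count x : Int))) =
        (E.map (fun x => (t.count x : Int) + if x = s then 1 else 0)) := by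
      apply List.map_congr_left
      intro x _
      rcases eq_or_ne x s with rfl | hne
      · simp [List.count_cons]
      · simp [List.count_cons, hne, Ne.symm hne]
    rw [hmap]
    have hsplit : ∀ (l : List Int),
        (l.map (fun x => (t.count x : Int) + if x = s then 1 else 0)).sum =
        (l.map (fun x => (t.count x : Int))).sum + (l.map (fun x => if x = s then (1:Int) else 0)).sum := by
      intro l; induction l with
      | nil => simp
      | cons y ys ihy => simp [ihy]; ring
    rw [hsplit, ih (fun x hx => hsub x (by simp [hx]))]
    rw [pvSum_ind E s, List.count_eq_one_of_mem hN hs]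
    simp [List.length_cons]

theorem pvSum_comb (E : List Int) (f1 f2 f3 g1 g2 g3 h : Int → Int) :
    (E.map (fun x => f1 x + f2 x + f3 x - (g1 x + g2 x + g3 x) + h x)).sum
      = (E.map f1).sum + (E.map f2).sum + (E.map f3).sum
        - (E.map g1).sum - (E.map g2).sum - (E.map g3).sum + (E.map h).sum := by
  induction E with
  | nil => simp
  | cons y ys ih => simp [ih]; ring

theorem pvInd_len (E A B : List Int) (hN : E.Nodup)
    (hA : ∀ x ∈ A, x ∈ E) :
    (E.map (fun x => if x ∈ A ∧ x ∈ B then (1:Int) else 0)).sum = ((pyIntersect A B).length : Int) := by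
  rw [pvSum_ite E (fun x => x ∈ A ∧ x ∈ B)]
  congr 1
  refine pvLen_eq_of_nodup _ _ (List.Nodup.filter _ hN) (pvNodup_intersect A B) (fun x => ?_)
  simp only [List.mem_filter, pvMem_intersect, decide_eq_true_eq]
  exact ⟨fun h => h.2, fun h => ⟨hA x h.1, h⟩⟩

-- main
theorem inclusionExclusion3_spec : Claim_equal_inclusionExclusion3 := by
  intro S T U _
  unfold Spec_inclusionExclusion3 inclusionExclusion3 inclusionExclusion3_alt
  simp only []
  set E := PySem.Set.union (PySem.Set.union (PySem.Set.ofList S) T) U with hE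
  have hEnd : E.Nodup := by
    apply PySem.Set.nodup_union
    apply PySem.Set.nodup_union
    exact PySem.Set.nodup_ofList S
  have hEmem : ∀ x : Int, x ∈ E ↔ x ∈ S ∨ x ∈ T ∨ x ∈ U := by
    intro x
    simp [hE, PySem.Set.mem_union, PySem.Set.mem_ofList, or_assoc]
  -- rewrite B's loop body into an additive form
  have hbody : E.foldl (fun total x =>
      total + ((pvCounterOf S).getD x 0 + (pvCounterOf T).getD x 0 + (pvCounterOf U).getD x 0)
        - (pvB2I ((pvCounterOf S).contains x && (pvCounterOf T).contains x)
            + pvB2I ((pvCounterOf S).contains x && (pvCounterOf U).contains x)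
            + pvB2I ((pvCounterOf U).contains x && (pvCounterOf T).contains x))
        + pvB2I ((pvCounterOf S).contains x && (pvCounterOf T).contains x && (pvCounterOf U).contains x)) 0
      = E.foldl (fun total x =>
      total + ((S.count x : Int) + (T.count x : Int) + (U.count x : Int)
        - ((if x ∈ S ∧ x ∈ T then (1:Int) else 0) + (if x ∈ S ∧ x ∈ U then (1:Int) else 0)
            + (if x ∈ U ∧ x ∈ T then (1:Int) else 0))
        + (if x ∈ S ∧ x ∈ T ∧ x ∈ U then (1:Int) else 0))) 0 := by
    apply PySem.List.foldl_congr_mem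
    intro acc x _
    have hc : ∀ L : List Int, pvCounterOf L = PySem.Dict.counter L := fun L =>
      PySem.Dict.foldl_insert_getD_add_one_eq_counter L
    simp only [hc, PySem.Dict.getD_counter, PySem.Dict.contains_counter, pvB2I]
    simp only [List.contains_eq_mem, Bool.and_eq_true, decide_eq_true_eq]
    split_ifs <;> simp_all <;> ring
  rw [hbody, PySem.List.foldl_add (g := fun x =>
      (S.count x : Int) + (T.count x : Int) + (U.count x : Int)
        - ((if x ∈ S ∧ x ∈ T then (1:Int) else 0) + (if x ∈ S ∧ x ∈ U then (1:Int) else 0)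
            + (if x ∈ U ∧ x ∈ T then (1:Int) else 0))
        + (if x ∈ S ∧ x ∈ T ∧ x ∈ U then (1:Int) else 0)),
    pvSum_comb]
  rw [pvSum_count S E hEnd (fun x hx => (hEmem x).mpr (Or.inl hx)),
      pvSum_count T E hEnd (fun x hx => (hEmem x).mpr (Or.inr (Or.inl hx))),
      pvSum_count U E hEnd (fun x hx => (hEmem x).mpr (Or.inr (Or.inr hx))),
      pvInd_len E S T hEnd (fun x hx => (hEmem x).mpr (Or.inl hx)),
      pvInd_len E S U hEnd (fun x hx => (hEmem x).mpr (Or.inl hx)),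
      pvInd_len E U T hEnd (fun x hx => (hEmem x).mpr (Or.inr (Or.inr hx)))]
  -- the triple intersection indicator = length of A's allSets
  have htriple : (E.map (fun x => if x ∈ S ∧ x ∈ T ∧ x ∈ U then (1:Int) else 0)).sum
      = ((pyIntersect U (pyIntersect S T)).length : Int) := by
    rw [pvSum_ite E (fun x => x ∈ S ∧ x ∈ T ∧ x ∈ U)]
    congr 1
    refine pvLen_eq_of_nodup _ _ (List.Nodup.filter _ hEnd)
      (pvNodup_intersect U (pyIntersect S T)) (fun x => ?_)
    simp only [List.mem_filter, pvMem_intersect, decide_eq_true_eq]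
    constructor
    · rintro ⟨_, hS, hT, hU⟩; exact ⟨hU, hS, hT⟩
    · rintro ⟨hU, hS, hT⟩; exact ⟨(hEmem x).mpr (Or.inl hS), hS, hT, hU⟩
  rw [htriple, pvFoldl_len, pvFoldl_sub, pvFoldl_sub, pvFoldl_sub, pvFoldl_len, pvFoldl_len, pvFoldl_len]
  ring
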